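-- pv_equiv track=rewrite | github.com/FreddyMachaca/INF-111 | PRACTICA PRIMER PARCIAL/Ejercicio12/Python/SecuenciaPatron.py | generar_secuencia
-- ===== SOURCE A (Python) =====
-- def generar_secuencia(n):
--     secuencia = []
--     count = 1
--
--     for i in range(n):
--         if count % 2 == 0:
--             secuencia.append(count + 1)
--         else:
--             secuencia.append(count)
--
--         count += 2
--
--     return secuencia
-- ===== SOURCE B (Python) =====
-- def generar_secuencia(n):
--     # Build the odd numbers back-to-front: walk down from the largest odd
--     # below 2*n, collecting as we go, then reverse once at the end.
--     out = []
--     v = 2 * n - 1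
--     while v >= 1:
--         out.append(v)
--         v -= 2
--     out.reverse()
--     return out
-- ===== Notes on version B (the rewrite author's own statement) =====
-- stated objective: alternative
-- what changed: Replaces A's forward counter loop with parity branch and append by a descending while loop that collects the odd numbers back-to-front, from the largest odd below twice n down to one, then reverses the list once at the end.
import Mathlib
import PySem

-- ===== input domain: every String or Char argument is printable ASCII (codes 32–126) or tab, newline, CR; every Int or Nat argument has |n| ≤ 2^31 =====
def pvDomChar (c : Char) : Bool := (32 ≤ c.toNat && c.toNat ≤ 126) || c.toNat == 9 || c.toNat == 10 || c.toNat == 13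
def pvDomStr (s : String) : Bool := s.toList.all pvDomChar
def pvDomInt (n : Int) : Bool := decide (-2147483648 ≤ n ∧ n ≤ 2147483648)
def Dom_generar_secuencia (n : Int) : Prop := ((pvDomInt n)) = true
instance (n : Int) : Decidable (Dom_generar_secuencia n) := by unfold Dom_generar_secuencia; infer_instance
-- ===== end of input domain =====

-- B replaces A's forward counter loop (parity branch + append) by a descending
-- while loop collecting the odds back-to-front (largest first), reversed once at the end.

-- ===== PORT A =====
def generar_secuencia (n : Int) : List Int :=
  ((PySem.List.pyRange 0 n 1).foldl (fun (st : List Int × Int) _ =>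
      (if PySem.Int.mod st.2 2 = 0 then st.1 ++ [st.2 + 1] else st.1 ++ [st.2], st.2 + 2)) ([], 1)).1

-- ===== PORT B =====
-- the 'while v >= 1' loop of Source B, appending v and stepping v -= 2
def genB_loop (v : Int) (acc : List Int) : List Int :=
  if v ≥ 1 then genB_loop (v - 2) (acc ++ [v]) else acc
termination_by v.toNat
decreasing_by omega

def generar_secuencia_alt (n : Int) : List Int :=
  (genB_loop (2 * n - 1) []).reverse

-- ===== PRECONDITION & SPEC =====
def Spec_generar_secuencia (n : Int) (out : List Int) : Prop := out = generar_secuencia_alt n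
instance (n : Int) (out : List Int) : Decidable (Spec_generar_secuencia n out) := by unfold Spec_generar_secuencia; infer_instance

-- ===== CLAIM (what is proved, stated in full; the proofs are below) =====
def Claim_equal_generar_secuencia : Prop := ∀ (n : Int), Dom_generar_secuencia n → Spec_generar_secuencia n (generar_secuencia n)

-- ===== LEMMAS AND PROOFS =====

-- A's loop body ignores the loop variable; with an odd counter 2*j+1 the even branch never fires.
lemma loopA (L : List Int) : ∀ (acc : List Int) (j : Int),
    (L.foldl (fun (st : List Int × Int) _ =>
      (if PySem.Int.mod st.2 2 = 0 then st.1 ++ [st.2 + 1] else st.1 ++ [st.2], st.2 + 2)) (acc, 2 * j + 1)).1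
    = acc ++ (List.range L.length).map (fun (k : Nat) => (2 * (j + k) + 1 : Int)) := by
  induction L with
  | nil => simp
  | cons x xs ih =>
    intro acc j
    have hmod : PySem.Int.mod (2 * j + 1) 2 = 1 := by
      rw [PySem.Int.mod_eq_emod_of_pos (by omega)]; omega
    simp only [List.foldl_cons, hmod]
    rw [if_neg (by norm_num : ¬ ((1:Int) = 0)), show (2 * j + 1 + 2 : Int) = 2 * (j + 1) + 1 by ring, ih (acc ++ [2 * j + 1]) (j + 1)]
    rw [List.length_cons, List.range_succ_eq_map]
    simp only [List.map_cons, List.map_map, List.append_assoc, List.singleton_append]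
    congr 1
    congr 1
    · ring
    · apply List.map_congr_left; intro k _; simp [Function.comp]; ring

-- B's descending loop started at 2*m-1 collects the first m odds in reverse order.
lemma loopB (m : Nat) : ∀ (acc : List Int),
    genB_loop (2 * (m : Int) - 1) acc
    = acc ++ ((List.range m).map (fun (k : Nat) => (2 * k + 1 : Int))).reverse := by
  induction m with
  | zero => intro acc; rw [genB_loop]; simp
  | succ m ih =>
    intro acc
    rw [genB_loop, if_pos (by push_cast; omega)]
    rw [show (2 * ((m + 1 : Nat) : Int) - 1 - 2) = 2 * (m : Int) - 1 by push_cast; ring, ih]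
    rw [List.range_succ]
    simp only [List.map_append, List.map_cons, List.map_nil, List.reverse_append,
      List.reverse_cons, List.reverse_nil, List.nil_append, List.append_assoc,
      List.cons_append]
    congr 2
    push_cast; ring

-- ===== VERDICT (by name: the statement is the Claim_ definition above) =====
theorem generar_secuencia_spec : Claim_equal_generar_secuencia := by
  intro n _
  have hA := loopA (PySem.List.pyRange 0 n 1) [] 0
  simp only [List.nil_append, zero_add, show (2 * (0:Int) + 1 : Int) = 1 by norm_num,
    PySem.List.length_pyRange_one,
    show ((n : Int) - 0).toNat = n.toNat by omega] at hA
  have hB : generar_secuencia_alt n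
      = (List.range n.toNat).map (fun (k : Nat) => (2 * k + 1 : Int)) := by
    unfold generar_secuencia_alt
    by_cases h : 0 < n
    · rw [show (2 * n - 1 : Int) = 2 * (n.toNat : Int) - 1 by omega, loopB n.toNat []]
      simp
    · rw [genB_loop, if_neg (by omega), show n.toNat = 0 by omega]
      simp
  simp only [Spec_generar_secuencia, generar_secuencia]
  rw [hA, hB]
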